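-- pv_equiv track=rewrite | github.com/Borschemancer/IGHCi | IGHCi/kernel.py | _process_code
-- ===== SOURCE A (Python) =====
-- from itertools            import groupby
--
-- def _process_code(code):
--     is_ghci_command = lambda line: line.strip().startswith(':')
--     wrap_block      = lambda lines: ":{\n" + "\n".join(lines) + "\n:}"
--     remove_markers  = lambda line: "" if line in {":{", ":}"} else line.replace(":{", "").replace(":}", "")
--
--     process_non_commands = lambda lines: [
--         wrap_block(block) if len(block) > 1 else block[0]
--         for block in (
--             list(block)
--             for is_nonempty, block in groupby(lines, key = lambda l: l.strip() != '')
--             if is_nonempty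
--         )
--     ]
--
--     lines  = map(remove_markers, code.splitlines())
--     groups = groupby(lines, key = is_ghci_command)
--
--     return [
--         item
--         for is_cmd, group in groups
--         for item in (list(group) if is_cmd else process_non_commands(list(group)))
--     ]
-- ===== SOURCE B (Python) =====
-- def _process_code(code):
--     wrap_block = lambda lines: ":{\n" + "\n".join(lines) + "\n:}"
--     remove_markers = lambda line: "" if line in {":{", ":}"} else line.replace(":{", "").replace(":}", "")
--
--     out = []
--     buf = []  # current run of consecutive non-empty, non-command lines
--
--     def flush():
--         if buf:
--             out.append(wrap_block(buf) if len(buf) > 1 else buf[0])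
--             buf.clear()
--
--     for line in map(remove_markers, code.splitlines()):
--         if line.strip().startswith(':'):
--             flush()
--             out.append(line)
--         elif line.strip():
--             buf.append(line)
--         else:
--             flush()
--     flush()
--     return out
-- ===== Notes on version B (the rewrite author's own statement) =====
-- stated objective: alternative
-- what changed: Replaces the two nested itertools.groupby passes (outer by command-ness, inner by non-emptiness, each materialized and re-scanned) by one explicit single-pass state machine that keeps a buffer of the current non-empty non-command run and flushes it at command lines, blank lines and end of input.
import Mathlib
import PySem

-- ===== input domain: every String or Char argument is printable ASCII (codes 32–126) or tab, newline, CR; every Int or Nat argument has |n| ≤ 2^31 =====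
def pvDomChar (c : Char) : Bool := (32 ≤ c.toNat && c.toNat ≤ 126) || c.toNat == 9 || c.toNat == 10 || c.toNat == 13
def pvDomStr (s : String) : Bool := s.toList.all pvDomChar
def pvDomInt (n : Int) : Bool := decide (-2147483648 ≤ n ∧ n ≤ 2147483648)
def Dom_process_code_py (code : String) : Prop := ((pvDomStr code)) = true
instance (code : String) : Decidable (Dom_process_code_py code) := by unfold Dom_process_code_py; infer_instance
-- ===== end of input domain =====

-- B replaces A's two nested groupby passes by one single-pass state machine with an
-- explicit buffer of the current non-empty non-command run (objective: alternative
-- decomposition, same cost); return values proved equal on all inputs.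

-- ===== PORT A =====
def pvIsCmdA (line : String) : Bool := PySem.Str.startswith (PySem.Str.strip line) ":"

def pvWrapA (lines : List String) : String := ":{\n" ++ PySem.Str.join "\n" lines ++ "\n:}"

def pvRemoveMarkersA (line : String) : String :=
  if line = ":{" ∨ line = ":}" then ""
  else PySem.Str.replace (PySem.Str.replace line ":{" "") ":}" ""

def pvNonemptyA (l : String) : Bool := decide (PySem.Str.strip l ≠ "")

-- literal materialization of itertools.groupby: consecutive runs with equal keys, in order
def pvGroupbyGo (key : String → Bool) (k : Bool) (cur : List String) :
    List String → List (Bool × List String)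
  | [] => [(k, cur)]
  | y :: ys =>
    if key y == k then pvGroupbyGo key k (cur ++ [y]) ys
    else (k, cur) :: pvGroupbyGo key (key y) [y] ys

def pvGroupby (key : String → Bool) : List String → List (Bool × List String)
  | [] => []
  | x :: xs => pvGroupbyGo key (key x) [x] xs

-- the body of process_non_commands' comprehension (kept group → one item, dropped group → none)
def pvFN (g : Bool × List String) : List String :=
  if g.1 then [if g.2.length > 1 then pvWrapA g.2 else g.2.headD ""] else []

def pvProcessNonCommands (lines : List String) : List String :=
  (pvGroupby pvNonemptyA lines).flatMap pvFN

-- the body of the outer comprehension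
def pvFA (g : Bool × List String) : List String :=
  if g.1 then g.2 else pvProcessNonCommands g.2

def process_code_py (code : String) : List String :=
  (pvGroupby pvIsCmdA ((PySem.Str.splitlines code).map pvRemoveMarkersA)).flatMap pvFA

-- ===== PORT B =====
def pvIsCmdB (line : String) : Bool := PySem.Str.startswith (PySem.Str.strip line) ":"

def pvWrapB (lines : List String) : String := ":{\n" ++ PySem.Str.join "\n" lines ++ "\n:}"

def pvRemoveMarkersB (line : String) : String :=
  if line = ":{" ∨ line = ":}" then ""
  else PySem.Str.replace (PySem.Str.replace line ":{" "") ":}" ""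

-- flush(): emit the buffered run (wrapped iff more than one line), empty the buffer
def pvFlushB (buf : List String) : List String :=
  match buf with
  | [] => []
  | x :: xs => if xs.isEmpty then [x] else [pvWrapB (x :: xs)]

-- one step of the for-loop; state = (out, buf)
def pvStepB (s : List String × List String) (line : String) : List String × List String :=
  if pvIsCmdB line then (s.1 ++ pvFlushB s.2 ++ [line], [])
  else if PySem.Str.strip line ≠ "" then (s.1, s.2 ++ [line])
  else (s.1 ++ pvFlushB s.2, [])

def process_code_py_alt (code : String) : List String :=
  let s := ((PySem.Str.splitlines code).map pvRemoveMarkersB).foldl pvStepB ([], [])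
  s.1 ++ pvFlushB s.2

-- ===== PRECONDITION & SPEC =====
def Spec_process_code_py (code : String) (out : List String) : Prop := out = process_code_py_alt code
instance (code : String) (out : List String) : Decidable (Spec_process_code_py code out) := by unfold Spec_process_code_py; infer_instance

-- ===== CLAIM (what is proved, stated in full; the proofs are below) =====
def Claim_equal_process_code_py : Prop := ∀ (code : String), Dom_process_code_py code → Spec_process_code_py code (process_code_py code)

-- ===== LEMMAS AND PROOFS =====

theorem pvCmdAB : pvIsCmdB = pvIsCmdA := rfl
theorem pvWrapAB : pvWrapB = pvWrapA := rfl

-- proof-side abbreviations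
def pvGoA (k : Bool) (cur ls : List String) : List String :=
  (pvGroupbyGo pvIsCmdA k cur ls).flatMap pvFA

def pvGoN (k : Bool) (cur ls : List String) : List String :=
  (pvGroupbyGo pvNonemptyA k cur ls).flatMap pvFN

def pvGB (buf ls : List String) : List String :=
  (ls.foldl pvStepB ([], buf)).1 ++ pvFlushB (ls.foldl pvStepB ([], buf)).2

theorem pvGoA_nil (k : Bool) (cur : List String) : pvGoA k cur [] = pvFA (k, cur) := by
  simp [pvGoA, pvGroupbyGo]

theorem pvGoA_cons (k : Bool) (cur : List String) (y : String) (ys : List String) :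
    pvGoA k cur (y :: ys) =
      if pvIsCmdA y == k then pvGoA k (cur ++ [y]) ys
      else pvFA (k, cur) ++ pvGoA (pvIsCmdA y) [y] ys := by
  simp only [pvGoA, pvGroupbyGo]
  split <;> simp

theorem pvGoN_nil (k : Bool) (cur : List String) : pvGoN k cur [] = pvFN (k, cur) := by
  simp [pvGoN, pvGroupbyGo]

theorem pvGoN_cons (k : Bool) (cur : List String) (y : String) (ys : List String) :
    pvGoN k cur (y :: ys) =
      if pvNonemptyA y == k then pvGoN k (cur ++ [y]) ys
      else pvFN (k, cur) ++ pvGoN (pvNonemptyA y) [y] ys := by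
  simp only [pvGoN, pvGroupbyGo]
  split <;> simp

theorem pvPnc_cons (x : String) (xs : List String) :
    pvProcessNonCommands (x :: xs) = pvGoN (pvNonemptyA x) [x] xs := rfl

theorem pvStepB_out (out buf : List String) (l : String) :
    pvStepB (out, buf) l = (out ++ (pvStepB ([], buf) l).1, (pvStepB ([], buf) l).2) := by
  simp only [pvStepB]
  split_ifs <;> simp

theorem pvFoldl_out (ls : List String) (out buf : List String) :
    ls.foldl pvStepB (out, buf)
      = (out ++ (ls.foldl pvStepB ([], buf)).1, (ls.foldl pvStepB ([], buf)).2) := by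
  induction ls generalizing out buf with
  | nil => simp
  | cons l ls ih =>
    simp only [List.foldl_cons]
    rw [pvStepB_out]
    rcases h : pvStepB ([], buf) l with ⟨o1, b1⟩
    rw [ih, ih o1 b1]
    simp

theorem pvGB_nil (buf : List String) : pvGB buf [] = pvFlushB buf := by simp [pvGB]

theorem pvGB_cons (buf : List String) (l : String) (ls : List String) :
    pvGB buf (l :: ls) =
      if pvIsCmdB l then pvFlushB buf ++ [l] ++ pvGB [] ls
      else if PySem.Str.strip l ≠ "" then pvGB (buf ++ [l]) ls
      else pvFlushB buf ++ pvGB [] ls := by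
  simp only [pvGB, List.foldl_cons]
  split_ifs with h1 h2
  · rw [show pvStepB ([], buf) l = (pvFlushB buf ++ [l], []) by simp [pvStepB, h1]]
    rw [pvFoldl_out]; simp
  · rw [show pvStepB ([], buf) l = ([], buf ++ [l]) by simp [pvStepB, h1, h2]]
  · rw [show pvStepB ([], buf) l = (pvFlushB buf, []) by simp [pvStepB, h1, h2]]
    rw [pvFoldl_out]; simp

-- dropped-group lemma: a group of empty lines contributes nothing
theorem pvGoN_false (rest : List String) : ∀ cur, pvGoN false cur rest = pvProcessNonCommands rest := by
  induction rest with
  | nil => intro cur; simp [pvGoN_nil, pvFN, pvProcessNonCommands, pvGroupby]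
  | cons z zs ih =>
    intro cur
    rw [pvGoN_cons]
    cases h : pvNonemptyA z with
    | false => simp only [beq_self_eq_true, if_true]; rw [ih, pvPnc_cons, h, ih]
    | true =>
      rw [pvPnc_cons, h]
      simp [pvFN]

theorem pvPnc_empty_cons (y : String) (rest : List String) (hy : pvNonemptyA y = false) :
    pvProcessNonCommands (y :: rest) = pvProcessNonCommands rest := by
  rw [pvPnc_cons, hy, pvGoN_false]

theorem pvFN_flush (cur : List String) (h : cur ≠ []) : pvFN (true, cur) = pvFlushB cur := by
  match cur with
  | [] => exact absurd rfl h
  | [x] => simp [pvFN, pvFlushB]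
  | x :: y :: t => simp [pvFN, pvFlushB, pvWrapAB]

-- a run of non-empty lines closed by end of input
theorem pvGoN_true_all (ys : List String) : ∀ cur, cur ≠ [] → (cur ++ ys).all pvNonemptyA →
    pvGoN true cur ys = pvFlushB (cur ++ ys) := by
  induction ys with
  | nil => intro cur h _; rw [pvGoN_nil]; simpa using pvFN_flush cur h
  | cons z zs ih =>
    intro cur h hall
    have hz : pvNonemptyA z = true := by
      have := List.all_eq_true.mp hall z (by simp)
      simpa using this
    rw [pvGoN_cons, hz]
    simp only [beq_self_eq_true, if_true]
    rw [ih (cur ++ [z]) (by simp) (by simpa using hall)]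
    simp

theorem pvPnc_all (buf : List String) (h : buf.all pvNonemptyA) :
    pvProcessNonCommands buf = pvFlushB buf := by
  match buf with
  | [] => rfl
  | x :: xs =>
    rw [pvPnc_cons, (by simpa using List.all_eq_true.mp h x (by simp) : pvNonemptyA x = true)]
    exact pvGoN_true_all xs [x] (by simp) (by simpa using h)

-- a run of non-empty lines closed by an empty line
theorem pvGoN_true_break (rest : List String) (y : String) (hy : pvNonemptyA y = false) :
    ∀ (xs cur : List String), cur ≠ [] → (cur ++ xs).all pvNonemptyA →
    pvGoN true cur (xs ++ y :: rest) = pvFlushB (cur ++ xs) ++ pvProcessNonCommands rest := by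
  intro xs
  induction xs with
  | nil =>
    intro cur h _
    simp only [List.nil_append, List.append_nil]
    rw [pvGoN_cons, hy]
    simp only [show (false == true) = false from rfl, if_neg Bool.false_ne_true]
    rw [pvFN_flush cur h, pvGoN_false]
  | cons z zs ih =>
    intro cur h hall
    have hz : pvNonemptyA z = true := by
      have := List.all_eq_true.mp hall z (by simp)
      simpa using this
    simp only [List.cons_append]
    rw [pvGoN_cons, hz]
    simp only [beq_self_eq_true, if_true]
    rw [ih (cur ++ [z]) (by simp) (by simpa using hall)]
    simp

theorem pvPnc_break (buf : List String) (y : String) (rest : List String)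
    (hb : buf.all pvNonemptyA) (hy : pvNonemptyA y = false) :
    pvProcessNonCommands (buf ++ y :: rest) = pvFlushB buf ++ pvProcessNonCommands rest := by
  match buf with
  | [] => simpa [pvFlushB] using pvPnc_empty_cons y rest hy
  | x :: xs =>
    rw [List.cons_append, pvPnc_cons,
      (by simpa using List.all_eq_true.mp hb x (by simp) : pvNonemptyA x = true)]
    exact pvGoN_true_break rest y hy xs [x] (by simp) (by simpa using hb)

-- the main fused-state-machine invariant, both group polarities at once
theorem pvMain : ∀ (n : ℕ) (ls : List String), ls.length ≤ n →
    (∀ cur, cur ≠ [] → pvGoA true cur ls = cur ++ pvGB [] ls) ∧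
    (∀ done E buf, (∀ rest, pvProcessNonCommands (done ++ rest) = E ++ pvProcessNonCommands rest) →
      buf.all pvNonemptyA → pvGoA false (done ++ buf) ls = E ++ pvGB buf ls) := by
  intro n
  induction n with
  | zero =>
    intro ls hls
    have : ls = [] := List.length_eq_zero_iff.mp (Nat.le_zero.mp hls)
    subst this
    constructor
    · intro cur _; rw [pvGoA_nil, pvGB_nil]; simp [pvFA, pvFlushB]
    · intro done E buf hE hbuf
      rw [pvGoA_nil, pvGB_nil]
      have h1 : pvFA (false, done ++ buf) = pvProcessNonCommands (done ++ buf) := by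
        simp [pvFA]
      rw [h1, hE buf, pvPnc_all buf hbuf]
  | succ n ih =>
    intro ls hls
    match ls with
    | [] => exact ih [] (by simp)
    | y :: ys =>
      have hys : ys.length ≤ n := by simpa using hls
      constructor
      · intro cur hcur
        rw [pvGoA_cons, pvGB_cons, pvCmdAB]
        cases hc : pvIsCmdA y with
        | true =>
          simp only [beq_self_eq_true, if_true]
          rw [(ih ys hys).1 (cur ++ [y]) (by simp)]
          simp [pvFlushB]
        | false =>
          simp only [show (false == true) = false from rfl, if_neg Bool.false_ne_true]
          have hfa : pvFA (true, cur) = cur := by simp [pvFA]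
          rw [hfa]
          by_cases hne : PySem.Str.strip y ≠ ""
          · have hneb : pvNonemptyA y = true := by simp [pvNonemptyA, hne]
            rw [if_pos hne]
            have := (ih ys hys).2 [] [] [y] (by intro rest; simp) (by simp [hneb])
            simpa using this
          · have hneb : pvNonemptyA y = false := by simp [pvNonemptyA] at hne ⊢; exact hne
            rw [if_neg hne]
            have := (ih ys hys).2 [y] [] []
              (by intro rest; simpa using pvPnc_empty_cons y rest hneb) (by simp)
            simp only [List.append_nil, List.nil_append] at this
            simp [pvFlushB, this]
      · intro done E buf hE hbuf
        rw [pvGoA_cons, pvGB_cons, pvCmdAB]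
        have hfa : pvFA (false, done ++ buf) = pvProcessNonCommands (done ++ buf) := by
          simp [pvFA]
        cases hc : pvIsCmdA y with
        | true =>
          simp only [show (true == false) = false from rfl, if_neg Bool.false_ne_true]
          rw [hfa, hE buf, pvPnc_all buf hbuf, (ih ys hys).1 [y] (by simp)]
          simp
        | false =>
          simp only [beq_self_eq_true, if_true]
          by_cases hne : PySem.Str.strip y ≠ ""
          · have hneb : pvNonemptyA y = true := by simp [pvNonemptyA, hne]
            rw [if_pos hne, show (done ++ buf) ++ [y] = done ++ (buf ++ [y]) by simp,
              (ih ys hys).2 done E (buf ++ [y]) hE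
                (by simp only [List.all_append] at hbuf ⊢; simp [hbuf, hneb])]
            simp
          · have hneb : pvNonemptyA y = false := by simp [pvNonemptyA] at hne ⊢; exact hne
            rw [if_neg hne,
              show (done ++ buf) ++ [y] = (done ++ buf ++ [y]) ++ ([] : List String) by simp,
              (ih ys hys).2 (done ++ buf ++ [y]) (E ++ pvFlushB buf) []
                (by
                  intro rest
                  rw [show done ++ buf ++ [y] ++ rest = done ++ (buf ++ y :: rest) by simp,
                    hE, pvPnc_break buf y rest hbuf hneb]
                  simp)
                (by simp)]
            simp

theorem pvLines (lines : List String) :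
    (pvGroupby pvIsCmdA lines).flatMap pvFA = pvGB [] lines := by
  match lines with
  | [] => simp [pvGroupby, pvGB_nil, pvFlushB]
  | x :: xs =>
    have hx : (pvGroupby pvIsCmdA (x :: xs)).flatMap pvFA = pvGoA (pvIsCmdA x) [x] xs := rfl
    rw [hx, pvGB_cons, pvCmdAB]
    cases hc : pvIsCmdA x with
    | true =>
      rw [(pvMain xs.length xs le_rfl).1 [x] (by simp)]
      simp [pvFlushB]
    | false =>
      by_cases hne : PySem.Str.strip x ≠ ""
      · have hneb : pvNonemptyA x = true := by simp [pvNonemptyA, hne]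
        rw [if_neg (by simp), if_pos hne]
        have := (pvMain xs.length xs le_rfl).2 [] [] [x] (by intro rest; simp) (by simp [hneb])
        simpa using this
      · have hneb : pvNonemptyA x = false := by simp [pvNonemptyA] at hne ⊢; exact hne
        rw [if_neg (by simp), if_neg hne]
        have := (pvMain xs.length xs le_rfl).2 [x] [] []
          (by intro rest; simpa using pvPnc_empty_cons x rest hneb) (by simp)
        simp only [List.append_nil, List.nil_append] at this
        simp [pvFlushB, this]

-- ===== VERDICT (by name: the statement is the Claim_ definition above) =====
theorem process_code_py_spec : Claim_equal_process_code_py := by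
  intro code _
  unfold Spec_process_code_py process_code_py process_code_py_alt
  rw [show pvRemoveMarkersB = pvRemoveMarkersA from rfl]
  exact pvLines _
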